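-- pv_equiv track=rewrite | github.com/riehseun/riehseun.github.io | leet150/leet395.py | get_bad_chars
-- ===== SOURCE A (Python) =====
-- from collections import defaultdict
--
-- def get_bad_chars(s, k):
--
--     char = defaultdict(int)
--
--     for i in s:
--         char[i] += 1
--
--     bad_chars = set()
--
--     for key,val in char.items():
--         if val < k:
--             bad_chars.add(key)
--
--     return bad_chars
-- ===== SOURCE B (Python) =====
-- def get_bad_chars(s, k):
--     bad = set()
--     while s:
--         c = s[0]
--         rest = ''.join(ch for ch in s if ch != c)
--         if len(s) - len(rest) < k:
--             bad.add(c)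
--         s = rest
--     return bad
-- ===== Notes on version B (the rewrite author's own statement) =====
-- stated objective: alternative
-- what changed: Replaced the one-pass defaultdict frequency table plus items loop by a peel-off loop with no table at all: repeatedly take the first remaining character, strip every occurrence of it from the string, and read its count off the length drop, shrinking the string until empty.
import Mathlib
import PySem

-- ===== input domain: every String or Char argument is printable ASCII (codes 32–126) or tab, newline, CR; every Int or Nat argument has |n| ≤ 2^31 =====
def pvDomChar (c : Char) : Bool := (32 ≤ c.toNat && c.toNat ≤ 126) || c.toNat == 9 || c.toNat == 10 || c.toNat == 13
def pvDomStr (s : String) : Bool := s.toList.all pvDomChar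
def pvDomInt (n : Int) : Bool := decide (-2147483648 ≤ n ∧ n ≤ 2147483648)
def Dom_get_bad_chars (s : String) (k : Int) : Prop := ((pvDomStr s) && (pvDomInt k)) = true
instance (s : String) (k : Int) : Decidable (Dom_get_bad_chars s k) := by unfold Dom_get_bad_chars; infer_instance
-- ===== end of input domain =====

-- B drops A's frequency table entirely: a peel-off loop repeatedly strips all copies of the
-- first remaining character and reads its count off the length drop (alternative, not faster).

-- ===== PORT A =====
def get_bad_chars (s : String) (k : Int) : List String :=
  -- char = defaultdict(int); for i in s: char[i] += 1
  let char : PySem.Dict String Int :=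
    s.toList.foldl (fun d c => d.modify (String.ofList [c]) 0 (· + 1)) PySem.Dict.empty
  -- bad_chars = set(); for key,val in char.items(): if val < k: bad_chars.add(key)
  char.items.foldl (fun bs kv => if kv.2 < k then PySem.Set.add bs kv.1 else bs) PySem.Set.empty

-- ===== PORT B =====
-- termination of the while loop: stripping the first character shortens the string
theorem pvRestLen (c : Char) (t : List Char) :
    ((c :: t).filter (fun ch => ch != c)).length < (c :: t).length := by
  simp only [List.filter_cons, bne_self_eq_false, Bool.false_eq_true, if_false, List.length_cons]
  exact Nat.lt_succ_of_le (List.length_filter_le _ t)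

-- while s: c = s[0]; rest = ''.join(ch for ch in s if ch != c);
--          if len(s)-len(rest) < k: bad.add(c); s = rest
def pvAltGo (k : Int) (l : List Char) (bad : PySem.Set String) : PySem.Set String :=
  match l with
  | [] => bad
  | c :: t =>
    let rest := (c :: t).filter (fun ch => ch != c)
    pvAltGo k rest
      (if ((c :: t).length : Int) - (rest.length : Int) < k then
        PySem.Set.add bad (String.ofList [c]) else bad)
termination_by l.length
decreasing_by exact pvRestLen c t

def get_bad_chars_alt (s : String) (k : Int) : List String :=
  pvAltGo k s.toList PySem.Set.empty

-- ===== PRECONDITION & SPEC =====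
def Spec_get_bad_chars (s : String) (k : Int) (out : List String) : Prop := out = get_bad_chars_alt s k
instance (s : String) (k : Int) (out : List String) : Decidable (Spec_get_bad_chars s k out) := by unfold Spec_get_bad_chars; infer_instance

-- ===== CLAIM (what is proved, stated in full; the proofs are below) =====
def Claim_equal_get_bad_chars : Prop := ∀ (s : String) (k : Int), Dom_get_bad_chars s k → Spec_get_bad_chars s k (get_bad_chars s k)

-- ===== LEMMAS AND PROOFS =====

-- the common normal form: distinct characters in first-occurrence order, filtered by count < k
def pvF (k : Int) (l : List Char) : List String :=
  (PySem.Set.ofList (l.map (fun c => String.ofList [c]))).filter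
    (fun key => decide (((l.map (fun c => String.ofList [c])).count key : Int) < k))

theorem pvMkSingletonInj : Function.Injective (fun c => String.ofList [c]) := by
  intro a b h
  have := congrArg String.toList h
  simp at this
  exact this

-- A's result equals the normal form.
theorem pvA_eq (s : String) (k : Int) : get_bad_chars s k = pvF k s.toList := by
  have hchar : s.toList.foldl (fun d c => d.modify (String.ofList [c]) 0 (· + 1)) PySem.Dict.empty
      = PySem.Dict.counter (s.toList.map (fun c => String.ofList [c])) := by
    rw [PySem.Dict.counter_eq_foldl, List.foldl_map]
  simp only [get_bad_chars, hchar, pvF]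
  rw [PySem.Dict.items_counter]
  rw [PySem.List.foldl_ite_eq_foldl_filter (p := fun kv : String × Int => kv.2 < k)]
  rw [List.filter_map, List.foldl_map]
  rw [show PySem.Set.empty = ([] : List String) from rfl, ← PySem.Set.ofList_eq_foldl]
  exact PySem.Set.ofList_eq_self_of_nodup _ (((PySem.Set.nodup_ofList _).filter _))

theorem pvFilterComm (l : List String) (p q : String → Bool) :
    (l.filter p).filter q = (l.filter q).filter p := by
  rw [List.filter_filter, List.filter_filter]
  apply List.filter_congr
  intro x _
  exact Bool.and_comm _ _

-- set(xs) commutes with filtering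
theorem pvOfListFilter (xs : List String) (p : String → Bool) :
    PySem.Set.ofList (xs.filter p) = (PySem.Set.ofList xs).filter p := by
  induction xs with
  | nil => rfl
  | cons a t ih =>
    by_cases h : p a
    · rw [List.filter_cons_of_pos h, PySem.Set.ofList_cons, PySem.Set.ofList_cons]
      simp only [PySem.Set.discard]
      rw [ih, List.filter_cons_of_pos h, pvFilterComm]
    · rw [List.filter_cons_of_neg (by simp [h]), PySem.Set.ofList_cons]
      simp only [PySem.Set.discard]
      rw [ih, List.filter_cons_of_neg (by simp [h]), List.filter_filter]
      apply List.filter_congr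
      intro x _
      by_cases hx : x = a
      · simp [hx, h]
      · simp [hx]

-- unfolding the normal form one distinct character at a time
theorem pvF_cons (k : Int) (c : Char) (t : List Char) :
    pvF k (c :: t) =
      (if ((c :: t).length : Int) - ((t.filter (fun ch => ch != c)).length : Int) < k
        then [String.ofList [c]] else []) ++ pvF k (t.filter (fun ch => ch != c)) := by
  have hlenc : t.length = (t.filter (fun ch => ch != c)).length + t.count c := by
    have h := List.length_eq_length_filter_add (l := t) (fun ch => ch != c)
    have h2 : (t.filter (fun ch => !(ch != c))).length = t.count c := by
      rw [List.count, List.countP_eq_length_filter]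
      congr 1
      apply List.filter_congr
      intro x _
      simp [bne]
    omega
  have hcnt : (((c :: t).map (fun c => String.ofList [c])).count (String.ofList [c]) : Int)
      = ((c :: t).length : Int) - ((t.filter (fun ch => ch != c)).length : Int) := by
    rw [List.count_map_of_injective _ _ pvMkSingletonInj]
    simp only [List.count_cons_self, List.length_cons]
    push_cast
    omega
  have hmapfilter : ((t.map (fun c => String.ofList [c])).filter
      (fun y => !(y == String.ofList [c])))
      = (t.filter (fun ch => ch != c)).map (fun c => String.ofList [c]) := by
    rw [List.filter_map]
    congr 1
    apply List.filter_congr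
    intro ch _
    by_cases hcc : ch = c
    · simp [hcc]
    · have hne : String.ofList [ch] ≠ String.ofList [c] := pvMkSingletonInj.ne hcc
      simp [Function.comp, bne, hne, hcc]
  have hof : PySem.Set.ofList ((c :: t).map (fun c => String.ofList [c]))
      = String.ofList [c]
        :: PySem.Set.ofList ((t.filter (fun ch => ch != c)).map (fun c => String.ofList [c])) := by
    simp only [List.map_cons, PySem.Set.ofList_cons, PySem.Set.discard]
    congr 1
    rw [← pvOfListFilter, hmapfilter]
  have hkey : ∀ key ∈ PySem.Set.ofList
        ((t.filter (fun ch => ch != c)).map (fun c => String.ofList [c])),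
      (decide ((((c :: t).map (fun c => String.ofList [c])).count key : Int) < k))
        = (decide ((((t.filter (fun ch => ch != c)).map (fun c => String.ofList [c])).count key : Int) < k)) := by
    intro key hkeymem
    have hmem : key ∈ (t.filter (fun ch => ch != c)).map (fun c => String.ofList [c]) := by
      simpa using (PySem.Set.mem_ofList _ _).mp hkeymem
    obtain ⟨d, hd, rfl⟩ := List.mem_map.mp hmem
    have hdc : d ≠ c := by simpa using List.of_mem_filter hd
    rw [List.count_map_of_injective _ _ pvMkSingletonInj,
        List.count_map_of_injective _ _ pvMkSingletonInj]
    have hcd : (t.filter (fun ch => ch != c)).count d = t.count d := by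
      rw [List.count_filter]
      simp [hdc]
    rw [hcd]
    simp [Ne.symm hdc]
  simp only [pvF, hof, List.filter_cons, hcnt]
  by_cases hk : ((c :: t).length : Int) - ((t.filter (fun ch => ch != c)).length : Int) < k
  · simp only [hk, decide_true, if_true, List.singleton_append, List.cons_inj_right]
    exact List.filter_congr hkey
  · simp only [hk, decide_false, if_false, List.nil_append]
    exact List.filter_congr hkey

-- loop invariant for B's peel-off loop
theorem pvAltGo_spec (k : Int) : ∀ (n : Nat) (l : List Char) (bad : List String),
    l.length ≤ n → (∀ c ∈ l, String.ofList [c] ∉ bad) →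
    pvAltGo k l bad = bad ++ pvF k l := by
  intro n
  induction n with
  | zero =>
    intro l bad hlen _
    cases l with
    | nil => simp [pvAltGo, pvF]
    | cons a t => simp at hlen
  | succ m ih =>
    intro l bad hlen hbad
    cases l with
    | nil => simp [pvAltGo, pvF]
    | cons c t =>
      rw [pvAltGo]
      show pvAltGo k ((c :: t).filter (fun ch => ch != c))
          (if ((c :: t).length : Int) - (((c :: t).filter (fun ch => ch != c)).length : Int) < k
            then PySem.Set.add bad (String.ofList [c]) else bad) = bad ++ pvF k (c :: t)
      have hrest : (c :: t).filter (fun ch => ch != c) = t.filter (fun ch => ch != c) := by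
        simp
      rw [hrest]
      have hnot : String.ofList [c] ∉ bad := hbad c List.mem_cons_self
      have hrlen : (t.filter (fun ch => ch != c)).length ≤ m := by
        have h1 := List.length_filter_le (fun ch => ch != c) t
        have h2 : t.length + 1 ≤ m + 1 := by simpa using hlen
        omega
      have hdprops : ∀ d ∈ t.filter (fun ch => ch != c), d ≠ c ∧ String.ofList [d] ∉ bad := by
        intro d hd
        have hdc : d ≠ c := by simpa using List.of_mem_filter hd
        exact ⟨hdc, hbad d (List.mem_cons_of_mem _ (List.mem_of_mem_filter hd))⟩
      by_cases hk : ((c :: t).length : Int) - ((t.filter (fun ch => ch != c)).length : Int) < k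
      · have hbadr : ∀ d ∈ t.filter (fun ch => ch != c),
            String.ofList [d] ∉ bad ++ [String.ofList [c]] := by
          intro d hd
          obtain ⟨hdc, hnb⟩ := hdprops d hd
          intro hmem
          rcases List.mem_append.mp hmem with h1 | h1
          · exact hnb h1
          · exact hdc (pvMkSingletonInj (List.mem_singleton.mp h1))
        rw [if_pos hk, PySem.Set.add_of_not_mem hnot,
            ih (t.filter (fun ch => ch != c)) (bad ++ [String.ofList [c]]) hrlen hbadr,
            pvF_cons, if_pos hk, List.append_assoc]
      · have hbadr : ∀ d ∈ t.filter (fun ch => ch != c), String.ofList [d] ∉ bad :=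
          fun d hd => (hdprops d hd).2
        rw [if_neg hk, ih (t.filter (fun ch => ch != c)) bad hrlen hbadr, pvF_cons, if_neg hk]
        simp

-- B's result equals the normal form.
theorem pvB_eq (s : String) (k : Int) : get_bad_chars_alt s k = pvF k s.toList := by
  have := pvAltGo_spec k s.toList.length s.toList [] le_rfl (by simp)
  simpa [get_bad_chars_alt, PySem.Set.empty] using this

-- ===== VERDICT (by name: the statement is the Claim_ definition above) =====
theorem get_bad_chars_spec : Claim_equal_get_bad_chars := by
  intro s k _
  unfold Spec_get_bad_chars
  rw [pvA_eq, pvB_eq]
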